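-- pv_equiv track=rewrite | github.com/tum-pbs/PhiFlow | phi/vis/_dash/viewsettings.py | _marks
-- ===== SOURCE A (Python) =====
-- def _marks(stop, limit=35, step=1) -> dict:
--     if stop <= limit * step:
--         return {i: str(i) for i in range(0, stop, step)}
--     if stop <= 2 * limit * step:
--         return _marks(stop, limit, step * 2)
--     if stop <= 5 * limit * step:
--         return _marks(stop, limit, step * 5)
--     else:
--         return _marks(stop, limit, step * 10)
-- ===== SOURCE B (Python) =====
-- def _marks(stop, limit=35, step=1) -> dict:
--     # Iterative re-decomposition: jump over the power-of-ten stages in one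
--     # while loop, then pick the final 2/5/10 multiplier once.
--     base = limit * step
--     if stop > base:
--         p = 1
--         while 10 * p * base < stop:
--             p *= 10
--         if stop <= 2 * p * base:
--             step *= 2 * p
--         elif stop <= 5 * p * base:
--             step *= 5 * p
--         else:
--             step *= 10 * p
--     return {i: str(i) for i in range(0, stop, step)}
-- ===== Notes on version B (the rewrite author's own statement) =====
-- stated objective: alternative
-- what changed: Replaces A's tail recursion (which re-enters the whole function multiplying step by 2/5/10) by an iterative scheme: one while loop scans only the powers of ten, then a single 2/5/10 selection fixes the final step, followed by one dict comprehension.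
import Mathlib
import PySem

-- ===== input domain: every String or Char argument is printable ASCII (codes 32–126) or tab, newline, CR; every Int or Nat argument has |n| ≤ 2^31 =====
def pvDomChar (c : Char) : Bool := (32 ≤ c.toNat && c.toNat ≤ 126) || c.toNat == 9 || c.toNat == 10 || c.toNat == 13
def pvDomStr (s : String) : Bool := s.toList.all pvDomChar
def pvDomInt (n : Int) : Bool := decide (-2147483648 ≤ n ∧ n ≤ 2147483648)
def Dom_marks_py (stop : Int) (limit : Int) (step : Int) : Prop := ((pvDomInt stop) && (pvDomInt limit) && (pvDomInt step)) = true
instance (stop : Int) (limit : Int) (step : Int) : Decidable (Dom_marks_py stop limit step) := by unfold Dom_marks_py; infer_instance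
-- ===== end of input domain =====

-- B replaces A's tail recursion by a while loop over powers of ten plus one final
-- 2/5/10 selection; same return value wherever A returns (objective: alternative).

-- ===== PORT A =====
-- shared helper: the dict comprehension {i: str(i) for i in range(0, stop, step)},
-- ported as a fold of Dict.insert in range order, both Pythons contain it verbatim
def rangeDict (stop : Int) (step : Int) : List (Int × String) :=
  ((PySem.List.pyRange 0 stop step).foldl
    (fun d i => d.insert i (PySem.Int.toStr i))
    (PySem.Dict.empty : PySem.Dict Int String)).items

def marks_py (stop : Int) (limit : Int) (step : Int) : List (Int × String) :=
  if stop ≤ limit * step then rangeDict stop step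
  else if limit * step ≤ 0 then []
    -- ^ totalizing guard only: the Python recurses forever here (limit*step stays ≤ 0);
    --   these inputs are excluded by Pre_marks_py
  else if stop ≤ 2 * limit * step then marks_py stop limit (step * 2)
  else if stop ≤ 5 * limit * step then marks_py stop limit (step * 5)
  else marks_py stop limit (step * 10)
termination_by (stop - limit * step).toNat
decreasing_by
  · have h2 : limit * (step * 2) = 2 * (limit * step) := by ring
    omega
  · have h5 : limit * (step * 5) = 5 * (limit * step) := by ring
    omega
  · have h10 : limit * (step * 10) = 10 * (limit * step) := by ring
    omega

-- ===== PORT B =====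
-- the while loop `while 10 * p * base < stop: p *= 10` of Source B as tail recursion;
-- the guards 0 < base, 0 < p only make it total (Python B loops forever when base ≤ 0,
-- outside Pre_marks_py; p is always a positive power of ten at call sites)
def findP (stop : Int) (base : Int) (p : Int) : Int :=
  if 0 < base ∧ 0 < p ∧ 10 * p * base < stop then findP stop base (p * 10) else p
termination_by (stop - 10 * p * base).toNat
decreasing_by
  rename_i h
  obtain ⟨hb, hp, hlt⟩ := h
  have hq : 0 < 10 * p * base := by positivity
  have h2 : 10 * (p * 10) * base = 10 * (10 * p * base) := by ring
  omega

def marks_py_alt (stop : Int) (limit : Int) (step : Int) : List (Int × String) :=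
  let base := limit * step
  if stop > base then
    let p := findP stop base 1
    let step' :=
      if stop ≤ 2 * p * base then step * (2 * p)
      else if stop ≤ 5 * p * base then step * (5 * p)
      else step * (10 * p)
    rangeDict stop step'
  else rangeDict stop step

-- ===== PRECONDITION & SPEC =====
-- Pre_ is exactly where Python A returns: it diverges when stop > limit*step ≤ 0
-- (the step keeps its sign, so limit*step never grows past stop), and raises
-- ValueError (range step 0) when step = 0 with stop ≤ 0.
def Pre_marks_py (stop : Int) (limit : Int) (step : Int) : Prop :=
  (stop ≤ limit * step ∨ 0 < limit * step) ∧ step ≠ 0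
instance (stop : Int) (limit : Int) (step : Int) : Decidable (Pre_marks_py stop limit step) := by
  unfold Pre_marks_py; infer_instance

def pvWitness_marks_py : Int × Int × Int := (100, 35, 1)

def Spec_marks_py (stop : Int) (limit : Int) (step : Int) (out : List (Int × String)) : Prop := out = marks_py_alt stop limit step
instance (stop : Int) (limit : Int) (step : Int) (out : List (Int × String)) : Decidable (Spec_marks_py stop limit step out) := by unfold Spec_marks_py; infer_instance

-- ===== CLAIM (what is proved, stated in full; the proofs are below) =====
def Claim_equal_marks_py : Prop := ∀ (stop : Int) (limit : Int) (step : Int), Dom_marks_py stop limit step → Pre_marks_py stop limit step → Spec_marks_py stop limit step (marks_py stop limit step)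

-- ===== LEMMAS AND PROOFS =====

-- shifting one power of ten from p into the base of B's while loop (fuelled induction)
lemma findP_shift_aux (stop base : Int) (hb : 0 < base) :
    ∀ (n : Nat) (p : Int), 0 < p → (stop - 10 * p * base).toNat ≤ n →
      findP stop base (p * 10) = 10 * findP stop (10 * base) p := by
  intro n
  induction n with
  | zero =>
    intro p hp hle
    have ht : 0 < 10 * p * base := by positivity
    have e1 : 10 * (p * 10) * base = 10 * (10 * p * base) := by ring
    have e2 : 10 * p * (10 * base) = 10 * (10 * p * base) := by ring
    conv_lhs => rw [findP]
    conv_rhs => rw [findP]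
    rw [if_neg (show ¬(0 < base ∧ 0 < p * 10 ∧ 10 * (p * 10) * base < stop) by
          rintro ⟨_, _, h⟩; omega),
        if_neg (show ¬(0 < 10 * base ∧ 0 < p ∧ 10 * p * (10 * base) < stop) by
          rintro ⟨_, _, h⟩; omega)]
    ring
  | succ n ih =>
    intro p hp hle
    have ht : 0 < 10 * p * base := by positivity
    have e1 : 10 * (p * 10) * base = 10 * (10 * p * base) := by ring
    have e2 : 10 * p * (10 * base) = 10 * (10 * p * base) := by ring
    by_cases hlt : 10 * (10 * p * base) < stop
    · conv_lhs => rw [findP]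
      conv_rhs => rw [findP]
      rw [if_pos (show 0 < base ∧ 0 < p * 10 ∧ 10 * (p * 10) * base < stop from
            ⟨hb, by omega, by omega⟩),
          if_pos (show 0 < 10 * base ∧ 0 < p ∧ 10 * p * (10 * base) < stop from
            ⟨by omega, hp, by omega⟩)]
      exact ih (p * 10) (by positivity) (by omega)
    · conv_lhs => rw [findP]
      conv_rhs => rw [findP]
      rw [if_neg (show ¬(0 < base ∧ 0 < p * 10 ∧ 10 * (p * 10) * base < stop) by
            rintro ⟨_, _, h⟩; omega),
          if_neg (show ¬(0 < 10 * base ∧ 0 < p ∧ 10 * p * (10 * base) < stop) by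
            rintro ⟨_, _, h⟩; omega)]
      ring

lemma findP_shift (stop base : Int) (hb : 0 < base) :
    findP stop base (1 * 10) = 10 * findP stop (10 * base) 1 :=
  findP_shift_aux stop base hb _ 1 one_pos le_rfl

lemma alt_of_le (stop limit step : Int) (h : ¬ limit * step < stop) :
    marks_py_alt stop limit step = rangeDict stop step := by
  simp only [marks_py_alt]
  rw [if_neg h]

-- main equivalence, by strong induction on the gap stop - limit*step
lemma marks_eqv (n : Nat) : ∀ (stop limit step : Int),
    (stop - limit * step).toNat ≤ n →
    (stop ≤ limit * step ∨ 0 < limit * step) →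
    marks_py stop limit step = marks_py_alt stop limit step := by
  induction n with
  | zero =>
    intro stop limit step hn hpre
    have h1 : stop ≤ limit * step := by omega
    rw [marks_py, if_pos h1, alt_of_le _ _ _ (by omega)]
  | succ n ih =>
    intro stop limit step hn hpre
    by_cases h1 : stop ≤ limit * step
    · rw [marks_py, if_pos h1, alt_of_le _ _ _ (by omega)]
    · have hL : 0 < limit * step := by omega
      have a2 : 2 * limit * step = 2 * (limit * step) := by ring
      have a5 : 5 * limit * step = 5 * (limit * step) := by ring
      have e2 : limit * (step * 2) = 2 * (limit * step) := by ring
      have e5 : limit * (step * 5) = 5 * (limit * step) := by ring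
      have e10 : limit * (step * 10) = 10 * (limit * step) := by ring
      rw [marks_py, if_neg h1, if_neg (by omega)]
      simp only [marks_py_alt]
      rw [if_pos (show stop > limit * step by omega)]
      by_cases h2 : stop ≤ 2 * limit * step
      · -- final multiplier 2
        have hp1 : findP stop (limit * step) 1 = 1 := by
          rw [findP, if_neg (by rintro ⟨_, _, h⟩; omega)]
        rw [if_pos h2, marks_py, if_pos (by omega), hp1,
            if_pos (show stop ≤ 2 * 1 * (limit * step) by omega)]
        congr 1
      · by_cases h5 : stop ≤ 5 * limit * step
        · -- final multiplier 5
          have hp1 : findP stop (limit * step) 1 = 1 := by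
            rw [findP, if_neg (by rintro ⟨_, _, h⟩; omega)]
          rw [if_neg h2, if_pos h5, marks_py, if_pos (by omega), hp1,
              if_neg (show ¬ stop ≤ 2 * 1 * (limit * step) by omega),
              if_pos (show stop ≤ 5 * 1 * (limit * step) by omega)]
          congr 1
        · rw [if_neg h2, if_neg h5]
          by_cases h10 : stop ≤ 10 * (limit * step)
          · -- final multiplier 10 (loop still exits at p = 1)
            have hp1 : findP stop (limit * step) 1 = 1 := by
              rw [findP, if_neg (by rintro ⟨_, _, h⟩; omega)]
            rw [marks_py, if_pos (by omega), hp1,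
                if_neg (show ¬ stop ≤ 2 * 1 * (limit * step) by omega),
                if_neg (show ¬ stop ≤ 5 * 1 * (limit * step) by omega)]
            congr 1
          · -- A recurses with step*10; B's loop advances p by one power of ten
            rw [ih stop limit (step * 10) (by omega) (Or.inr (by omega))]
            simp only [marks_py_alt]
            rw [if_pos (show stop > limit * (step * 10) by omega)]
            have hfind : findP stop (limit * step) 1 =
                10 * findP stop (10 * (limit * step)) 1 := by
              rw [findP, if_pos ⟨hL, one_pos, by omega⟩]
              exact findP_shift stop (limit * step) hL
            rw [e10, hfind]
            generalize findP stop (10 * (limit * step)) 1 = q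
            have c2 : 2 * (10 * q) * (limit * step) = 2 * q * (10 * (limit * step)) := by ring
            have c5 : 5 * (10 * q) * (limit * step) = 5 * q * (10 * (limit * step)) := by ring
            rw [c2, c5]
            split_ifs <;> (congr 1; ring)

-- ===== VERDICT (by name: the statement is the Claim_ definition above) =====
theorem marks_py_spec : Claim_equal_marks_py := by
  intro stop limit step _ hpre
  unfold Spec_marks_py
  exact marks_eqv (stop - limit * step).toNat stop limit step le_rfl hpre.1
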